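-- pv_equiv track=rewrite | github.com/muhammad-hamizan/algorithms-comparison | sum_of_array.py | batman
-- ===== SOURCE A (Python) =====
-- def batman(arr):
--     n = len(arr)
--     next_greater = [0] * n
--     stack = []
--
--     for i in range(n):
--         while stack and arr[i] > arr[stack[-1]]:
--             idx = stack.pop()
--             next_greater[idx] = arr[i]
--         stack.append(i)
--
--     return sum(next_greater) % 1000000001
-- ===== SOURCE B (Python) =====
-- def batman(arr):
--     def first_greater(x, rest):
--         for y in rest:
--             if y > x:
--                 return y
--         return 0
--
--     total = 0
--     n = len(arr)
--     for i in range(n):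
--         total += first_greater(arr[i], arr[i + 1:])
--     return total % 1000000001
-- ===== Notes on version B (the rewrite author's own statement) =====
-- stated objective: simpler
-- what changed: Replaces the monotonic-stack single pass with mutated next_greater array by a direct nested scan: for each index, scan forward for the first strictly greater element and add it to a running total.
import Mathlib
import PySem

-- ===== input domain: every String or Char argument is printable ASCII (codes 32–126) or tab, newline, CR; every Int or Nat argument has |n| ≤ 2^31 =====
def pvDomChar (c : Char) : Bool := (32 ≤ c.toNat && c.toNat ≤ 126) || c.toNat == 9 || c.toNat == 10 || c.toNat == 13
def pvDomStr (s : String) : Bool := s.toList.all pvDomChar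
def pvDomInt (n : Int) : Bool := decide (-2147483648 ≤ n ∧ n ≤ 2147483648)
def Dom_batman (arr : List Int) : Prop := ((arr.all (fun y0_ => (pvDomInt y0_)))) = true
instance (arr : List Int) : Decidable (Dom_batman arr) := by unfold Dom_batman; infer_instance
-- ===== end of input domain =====

-- B replaces A's monotonic-stack single pass by a plain nested forward scan; same return value, simpler code.

-- ===== PORT A =====
-- the inner 'while stack and arr[i] > arr[stack[-1]]' loop; the Lean list's head is the
-- Python stack's top, indices are the loop variables of range(n) so Nat indexing is exact
def batmanPop (arr : List Int) (i : Nat) : List Int → List Nat → List Int × List Nat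
  | ng, [] => (ng, [])
  | ng, k :: rest =>
    if arr.getD k 0 < arr.getD i 0 then batmanPop arr i (ng.set k (arr.getD i 0)) rest
    else (ng, k :: rest)

def batman (arr : List Int) : Int :=
  let n := arr.length
  let st := (List.range n).foldl
    (fun st i =>
      let p := batmanPop arr i st.1 st.2
      (p.1, i :: p.2))
    (List.replicate n 0, ([] : List Nat))
  PySem.Int.mod st.1.sum 1000000001

-- ===== PORT B =====
-- helper first_greater of Source B: first element of rest strictly greater than x, else 0
def firstGreater (x : Int) : List Int → Int
  | [] => 0
  | y :: ys => if x < y then y else firstGreater x ys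

def batman_alt (arr : List Int) : Int :=
  let n := arr.length
  -- arr[i+1:] with 0 ≤ i is exactly List.drop (i+1)
  let total := (List.range n).foldl
    (fun acc i => acc + firstGreater (arr.getD i 0) (arr.drop (i + 1))) 0
  PySem.Int.mod total 1000000001

-- ===== PRECONDITION & SPEC =====
def Spec_batman (arr : List Int) (out : Int) : Prop := out = batman_alt arr
instance (arr : List Int) (out : Int) : Decidable (Spec_batman arr out) := by unfold Spec_batman; infer_instance

-- ===== CLAIM (what is proved, stated in full; the proofs are below) =====
def Claim_equal_batman : Prop := ∀ (arr : List Int), Dom_batman arr → Spec_batman arr (batman arr)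

-- ===== LEMMAS AND PROOFS =====

-- first strictly greater element, as an Option (distinguishes 'found 0' from 'not found')
def fgo (x : Int) : List Int → Option Int
  | [] => none
  | y :: ys => if x < y then some y else fgo x ys

theorem firstGreater_eq_fgo (x : Int) (l : List Int) : firstGreater x l = (fgo x l).getD 0 := by
  induction l with
  | nil => rfl
  | cons y ys ih => by_cases h : x < y <;> simp [firstGreater, fgo, h, ih]

theorem fgo_append_singleton (x y : Int) (l : List Int) :
    fgo x (l ++ [y]) = (fgo x l).orElse (fun _ => if x < y then some y else none) := by
  induction l with
  | nil => by_cases h : x < y <;> simp [fgo, h]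
  | cons z zs ih => by_cases h : x < z <;> simp [fgo, h, ih]

theorem none_orElse_int (f : Unit → Option Int) : (none : Option Int).orElse f = f () := rfl

-- first greater element of arr[k] among arr[k+1:i]
def pres (a : List Int) (i k : Nat) : Option Int := fgo (a.getD k 0) ((a.take i).drop (k + 1))

theorem pres_of_le (a : List Int) {i k : Nat} (h : i ≤ k + 1) : pres a i k = none := by
  have : (a.take i).drop (k + 1) = [] := by
    apply List.drop_eq_nil_of_le
    calc (a.take i).length ≤ i := by simp
      _ ≤ k + 1 := h
  simp [pres, this, fgo]

theorem pres_succ (a : List Int) {i k : Nat} (hk : k < i) (hi : i < a.length) :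
    pres a (i + 1) k =
      (pres a i k).orElse (fun _ => if a.getD k 0 < a.getD i 0 then some (a.getD i 0) else none) := by
  have h1 : a.take (i + 1) = a.take i ++ [a.getD i 0] := by
    rw [List.take_add_one]
    simp [List.getD, List.getElem?_eq_getElem hi]
  have h2 : (a.take i ++ [a.getD i 0]).drop (k + 1)
      = (a.take i).drop (k + 1) ++ [a.getD i 0] := by
    rw [List.drop_append_of_le_length]
    simp; omega
  rw [pres, h1, h2, fgo_append_singleton]; rfl

-- pres is stable once resolved
theorem pres_stable (a : List Int) {i k : Nat} (hk : k < i) (hi : i < a.length)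
    (h : (pres a i k).isSome) : pres a (i + 1) k = pres a i k := by
  rw [pres_succ a hk hi]
  cases hp : pres a i k with
  | none => rw [hp] at h; simp at h
  | some v => rfl

-- the relation along the stack (head = top): indices decrease, values do not decrease
def StkR (a : List Int) (p q : Nat) : Prop := q < p ∧ a.getD p 0 ≤ a.getD q 0

-- loop invariant after processing i iterations of the outer loop
def LoopInv (a : List Int) (i : Nat) (ng : List Int) (stack : List Nat) : Prop :=
  ng.length = a.length ∧
  (∀ k, ng.getD k 0 = (pres a i k).getD 0) ∧
  (∀ k ∈ stack, k < i ∧ pres a i k = none) ∧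
  (∀ k, k < i → k ∉ stack → (pres a i k).isSome) ∧
  List.Pairwise (StkR a) stack

-- post-condition of the inner while loop (proved by induction on the stack)
theorem batmanPop_post (a : List Int) (i : Nat) (hi : i < a.length) :
    ∀ (stack : List Nat) (ng : List Int),
    ng.length = a.length →
    (∀ k, k ∉ stack → ng.getD k 0 = (pres a (i + 1) k).getD 0) →
    (∀ k ∈ stack, k < i ∧ pres a i k = none ∧ ng.getD k 0 = 0) →
    List.Pairwise (StkR a) stack →
    ((batmanPop a i ng stack).1.length = a.length ∧
     (∀ k, k ∉ (batmanPop a i ng stack).2 → (batmanPop a i ng stack).1.getD k 0 = (pres a (i + 1) k).getD 0) ∧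
     (∀ k ∈ (batmanPop a i ng stack).2, k < i ∧ pres a i k = none ∧
        (batmanPop a i ng stack).1.getD k 0 = 0 ∧ ¬ a.getD k 0 < a.getD i 0) ∧
     List.Pairwise (StkR a) (batmanPop a i ng stack).2 ∧
     (∀ k ∈ stack, k ∉ (batmanPop a i ng stack).2 → (pres a (i + 1) k).isSome)) := by
  intro stack
  induction stack with
  | nil =>
    intro ng h1 h2 h3 h4
    show (batmanPop a i ng []).1.length = a.length ∧ _
    simp only [batmanPop]
    exact ⟨h1, fun k _ => h2 k (by simp), by simp, List.Pairwise.nil, by simp⟩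
  | cons s rest ih =>
    intro ng h1 h2 h3 h4
    have hs := h3 s (by simp)
    have hsrest : s ∉ rest := by
      intro hmem
      have := (List.pairwise_cons.mp h4).1 s hmem
      exact absurd this.1 (lt_irrefl s)
    by_cases hcmp : a.getD s 0 < a.getD i 0
    · -- pop s
      have heq : batmanPop a i ng (s :: rest) = batmanPop a i (ng.set s (a.getD i 0)) rest := by
        simp only [batmanPop, if_pos hcmp]
      rw [heq]
      have hsres : pres a (i + 1) s = some (a.getD i 0) := by
        rw [pres_succ a hs.1 hi, hs.2.1, none_orElse_int, if_pos hcmp]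
      have hres := ih (ng.set s (a.getD i 0))
        (by simp [h1])
        (by
          intro k hk
          by_cases hks : k = s
          · subst hks
            rw [List.getD, List.getElem?_set_self (by rw [h1]; exact lt_of_lt_of_le hs.1 (le_of_lt hi))]
            simp [hsres]
          · rw [List.getD, List.getElem?_set_ne (by omega), ← List.getD]
            exact h2 k (by simp [hks, hk])
        )
        (by
          intro k hk
          have hk' := h3 k (by simp [hk])
          have hks : k ≠ s := fun h => hsrest (h ▸ hk)
          refine ⟨hk'.1, hk'.2.1, ?_⟩
          rw [List.getD, List.getElem?_set_ne (by omega), ← List.getD]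
          exact hk'.2.2
        )
        ((List.pairwise_cons.mp h4).2)
      refine ⟨hres.1, hres.2.1, hres.2.2.1, hres.2.2.2.1, ?_⟩
      intro k hk hk2
      rcases List.mem_cons.mp hk with hks | hkr
      · subst hks; simp [hsres]
      · exact hres.2.2.2.2 k hkr hk2
    · -- stop: return (ng, s :: rest)
      have heq : batmanPop a i ng (s :: rest) = (ng, s :: rest) := by
        simp only [batmanPop, if_neg hcmp]
      rw [heq]
      refine ⟨h1, h2, ?_, h4, fun k hk hk2 => absurd hk hk2⟩
      intro k hk
      rcases List.mem_cons.mp hk with hks | hkr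
      · subst hks; exact ⟨hs.1, hs.2.1, hs.2.2, hcmp⟩
      · have hk' := h3 k (by simp [hkr])
        have hR := (List.pairwise_cons.mp h4).1 k hkr
        refine ⟨hk'.1, hk'.2.1, hk'.2.2, ?_⟩
        have : a.getD i 0 ≤ a.getD s 0 := le_of_not_gt hcmp
        have : a.getD i 0 ≤ a.getD k 0 := le_trans this hR.2
        omega

-- one outer-loop step preserves the invariant
theorem step_inv (a : List Int) (i : Nat) (hi : i < a.length) (ng : List Int) (stack : List Nat)
    (h : LoopInv a i ng stack) :
    LoopInv a (i + 1) (batmanPop a i ng stack).1 (i :: (batmanPop a i ng stack).2) := by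
  obtain ⟨h1, h2, h3, h4, h5⟩ := h
  have hpost := batmanPop_post a i hi stack ng h1
    (by
      intro k hk
      rcases Nat.lt_or_ge k i with hki | hki
      · have hks := h4 k hki hk
        rw [pres_stable a hki hi hks]; exact h2 k
      · have hnone : pres a (i + 1) k = none := pres_of_le a (by omega)
        have hnone' : pres a i k = none := pres_of_le a (by omega)
        rw [hnone]; rw [h2 k, hnone']
    )
    (by
      intro k hk
      have hk' := h3 k hk
      exact ⟨hk'.1, hk'.2, by rw [h2 k, hk'.2]; rfl⟩)
    h5
  obtain ⟨q1, q2, q3, q4, q6⟩ := hpost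
  have hstacklt : ∀ k ∈ (batmanPop a i ng stack).2, pres a (i + 1) k = none := by
    intro k hk
    have hk' := q3 k hk
    rw [pres_succ a hk'.1 hi, hk'.2.1, none_orElse_int, if_neg hk'.2.2.2]
  refine ⟨q1, ?_, ?_, ?_, ?_⟩
  · intro k
    by_cases hk : k ∈ (batmanPop a i ng stack).2
    · rw [hstacklt k hk, (q3 k hk).2.2.1]; rfl
    · exact q2 k hk
  · intro k hk
    rcases List.mem_cons.mp hk with hki | hkr
    · rw [hki]; exact ⟨Nat.lt_succ_self i, pres_of_le a (by omega)⟩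
    · exact ⟨(q3 k hkr).1.trans (Nat.lt_succ_self i), hstacklt k hkr⟩
  · intro k hk hknot
    have hki : k ≠ i := fun h => hknot (h ▸ List.mem_cons_self ..)
    have hk' : k < i := by omega
    have hknot' : k ∉ (batmanPop a i ng stack).2 := fun h => hknot (List.mem_cons_of_mem _ h)
    by_cases hks : k ∈ stack
    · exact q6 k hks hknot'
    · have := h4 k hk' hks
      rw [pres_stable a hk' hi this]
      exact this
  · rw [List.pairwise_cons]
    refine ⟨?_, q4⟩
    intro q hq
    have hq' := q3 q hq
    exact ⟨hq'.1, le_of_not_gt hq'.2.2.2⟩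

-- the invariant holds after the whole outer loop
theorem fold_inv (a : List Int) : ∀ (m : Nat), m ≤ a.length →
    LoopInv a m
      ((List.range m).foldl
        (fun st i => let p := batmanPop a i st.1 st.2; (p.1, i :: p.2))
        (List.replicate a.length 0, ([] : List Nat))).1
      ((List.range m).foldl
        (fun st i => let p := batmanPop a i st.1 st.2; (p.1, i :: p.2))
        (List.replicate a.length 0, ([] : List Nat))).2 := by
  intro m
  induction m with
  | zero =>
    intro _
    refine ⟨by simp, ?_, by simp, by simp, by simp⟩
    intro k
    rw [pres_of_le a (by omega)]
    simp [List.getD]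
  | succ m ih =>
    intro hm
    rw [List.range_succ, List.foldl_append, List.foldl_cons, List.foldl_nil]
    exact step_inv a m (by omega) _ _ (ih (by omega))

-- sum of a list = sum of its getD's over range of its length
theorem sum_eq_map_range (l : List Int) :
    l.sum = ((List.range l.length).map (fun k => l.getD k 0)).sum := by
  induction l using List.reverseRecOn with
  | nil => simp
  | append_singleton xs x ih =>
    rw [List.sum_append, List.length_append, List.length_singleton,
      List.range_succ, List.map_append, List.sum_append]
    congr 1
    · rw [ih]
      apply congrArg
      apply List.map_congr_left
      intro k hk
      have hk' : k < xs.length := List.mem_range.mp hk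
      rw [List.getD, List.getD, List.getElem?_append_left hk']
    · simp [List.getD]

-- B's fold is the sum of per-index first-greater values
theorem alt_fold (a : List Int) (l : List Nat) (c : Int) :
    l.foldl (fun acc i => acc + firstGreater (a.getD i 0) (a.drop (i + 1))) c
      = c + (l.map (fun i => firstGreater (a.getD i 0) (a.drop (i + 1)))).sum := by
  induction l generalizing c with
  | nil => simp
  | cons x xs ih => rw [List.foldl_cons, ih, List.map_cons, List.sum_cons]; ring

theorem pres_length (a : List Int) (k : Nat) :
    pres a a.length k = fgo (a.getD k 0) (a.drop (k + 1)) := by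
  rw [pres, List.take_length]

-- ===== VERDICT (by name: the statement is the Claim_ definition above) =====
theorem batman_spec : Claim_equal_batman := by
  intro arr _
  unfold Spec_batman batman batman_alt
  obtain ⟨h1, h2, _, _, _⟩ := fold_inv arr arr.length (le_refl _)
  simp only
  rw [alt_fold, sum_eq_map_range, h1, zero_add]
  congr 2
  apply List.map_congr_left
  intro k _
  rw [h2 k, pres_length, firstGreater_eq_fgo]
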